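-- pv_equiv track=rewrite | github.com/AldythNahak/hackerrank | sorted_sum.py | sortedSum
-- ===== SOURCE A (Python) =====
-- def sortedSum(a):
--     MOD = 10**9 + 7
--     total = 0
--     prefix = []
--
--     for val in a:
--         prefix.append(val)
--         prefix.sort()
--         for i in range(len(prefix)):
--             total = (total + prefix[i] * (i + 1)) % MOD
--
--     return total
-- ===== SOURCE B (Python) =====
-- import bisect
--
-- def sortedSum(a):
--     MOD = 10**9 + 7
--     total = 0
--     s = []
--     f = 0
--     for val in a:
--         k = bisect.bisect_left(s, val)
--         f = (f + val * (k + 1) + sum(s[k:])) % MOD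
--         s.insert(k, val)
--         total = (total + f) % MOD
--     return total
-- ===== Notes on version B (the rewrite author's own statement) =====
-- stated objective: faster
-- what changed: Instead of re-sorting every prefix and re-scanning it with a mod per term, B keeps the prefix sorted by binary-search insertion and updates the rank-weighted sum f incrementally (f += val*(k+1) + sum of the tail shifted up one rank), adding f mod 1e9+7 to the total once per element.
import Mathlib
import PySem

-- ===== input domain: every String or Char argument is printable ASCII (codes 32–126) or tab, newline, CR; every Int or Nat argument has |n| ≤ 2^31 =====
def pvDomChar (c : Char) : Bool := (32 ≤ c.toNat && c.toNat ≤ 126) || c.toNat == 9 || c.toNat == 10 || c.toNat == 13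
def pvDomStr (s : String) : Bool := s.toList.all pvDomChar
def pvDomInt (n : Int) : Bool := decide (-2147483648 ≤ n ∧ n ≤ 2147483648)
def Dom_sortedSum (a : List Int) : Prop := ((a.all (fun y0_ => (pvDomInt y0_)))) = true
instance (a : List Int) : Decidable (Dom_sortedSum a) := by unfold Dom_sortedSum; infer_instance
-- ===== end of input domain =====

-- B replaces A's per-prefix re-sort + per-term mod scan by sorted insertion with an
-- incrementally maintained rank-weighted sum; proved to return the identical total.

-- ===== PORT A =====
def sortedSum (a : List Int) : Int :=
  (a.foldl (fun (st : Int × List Int) val =>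
      let prefix1 := st.2 ++ [val]
      let prefix2 := PySem.List.sorted prefix1 (fun x => x) false
      let total := (PySem.List.pyRange 0 (PySem.List.len prefix2) 1).foldl
          (fun t i => PySem.Int.mod (t + PySem.List.pyGetD prefix2 i 0 * (i + 1)) 1000000007) st.1
      (total, prefix2))
    ((0 : Int), ([] : List Int))).1

-- ===== PORT B =====
def sortedSum_alt (a : List Int) : Int :=
  (a.foldl (fun (st : Int × List Int × Int) val =>
      let k := PySem.List.bisectLeft st.2.1 val
      let f := PySem.Int.mod (st.2.2 + val * ((k : Int) + 1) + (st.2.1.drop k).sum) 1000000007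
      let s := PySem.List.insert st.2.1 (k : Int) val
      let total := PySem.Int.mod (st.1 + f) 1000000007
      (total, s, f))
    ((0 : Int), ([] : List Int), (0 : Int))).1

-- ===== PRECONDITION & SPEC =====
def Spec_sortedSum (a : List Int) (out : Int) : Prop := out = sortedSum_alt a
instance (a : List Int) (out : Int) : Decidable (Spec_sortedSum a out) := by unfold Spec_sortedSum; infer_instance

-- ===== CLAIM (what is proved, stated in full; the proofs are below) =====
def Claim_equal_sortedSum : Prop := ∀ (a : List Int), Dom_sortedSum a → Spec_sortedSum a (sortedSum a)

-- ===== LEMMAS AND PROOFS =====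

-- rank-weighted sum with starting rank j : pvFw j [x0, x1, …] = x0*j + x1*(j+1) + …
def pvFw (j : Int) : List Int → Int
  | [] => 0
  | x :: t => x * j + pvFw (j + 1) t

lemma pvFw_append (u : List Int) : ∀ (v : List Int) (j : Int),
    pvFw j (u ++ v) = pvFw j u + pvFw (j + u.length) v := by
  induction u with
  | nil => intro v j; simp [pvFw]
  | cons x t ih =>
      intro v j
      simp only [List.cons_append, pvFw, ih, List.length_cons]
      push_cast
      ring

lemma pvFw_shift (l : List Int) : ∀ (j : Int), pvFw (j + 1) l = pvFw j l + l.sum := by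
  induction l with
  | nil => intro j; simp [pvFw]
  | cons x t ih =>
      intro j
      simp only [pvFw, List.sum_cons, ih (j + 1)]
      ring

lemma pvFw_enum (l : List Int) : ∀ (s : Int),
    ((PySem.List.enumerate l s).map (fun p => p.2 * (p.1 + 1))).sum = pvFw (s + 1) l := by
  induction l with
  | nil => intro s; simp [PySem.List.enumerate_nil, pvFw]
  | cons x t ih =>
      intro s
      simp only [PySem.List.enumerate_cons, List.map_cons, List.sum_cons, pvFw]
      rw [ih (s + 1)]

lemma pvModM_eq (x : Int) : PySem.Int.mod x 1000000007 = x % 1000000007 :=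
  PySem.Int.mod_eq_emod_of_pos (by norm_num)

-- inner accumulating-mod fold collapses to one mod (for a nonempty index list)
lemma pvModFold (g : Int → Int) : ∀ (idxs : List Int) (t : Int), idxs ≠ [] →
    idxs.foldl (fun t i => PySem.Int.mod (t + g i) 1000000007) t
      = PySem.Int.mod (t + (idxs.map g).sum) 1000000007 := by
  intro idxs
  induction idxs with
  | nil => intro t h; exact absurd rfl h
  | cons x xs ih =>
      intro t _
      rcases eq_or_ne xs [] with rfl | hne
      · simp
      · rw [List.foldl_cons, ih _ hne, List.map_cons, List.sum_cons, pvModM_eq, pvModM_eq,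
          pvModM_eq]
        omega

-- A's inner loop over range(len(l)) computes (t + pvFw 1 l) mod M
lemma pvInner (l : List Int) (t : Int) (h : l ≠ []) :
    (PySem.List.pyRange 0 (PySem.List.len l) 1).foldl
        (fun t i => PySem.Int.mod (t + PySem.List.pyGetD l i 0 * (i + 1)) 1000000007) t
      = PySem.Int.mod (t + pvFw 1 l) 1000000007 := by
  have hne : PySem.List.pyRange 0 (PySem.List.len l) 1 ≠ [] := by
    rw [PySem.List.pyRange_one_cons]
    · exact List.cons_ne_nil _ _
    · simp only [PySem.List.len_eq]
      exact_mod_cast Nat.pos_of_ne_zero (fun hz => h (List.length_eq_zero_iff.mp hz))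
  rw [pvModFold (fun i => PySem.List.pyGetD l i 0 * (i + 1))
      (PySem.List.pyRange 0 (PySem.List.len l) 1) t hne]
  congr 1
  have henum := PySem.List.enumerate_eq_map_pyRange (xs := l) (d := 0)
  have hmaps : ((PySem.List.enumerate l 0).map (fun p => p.2 * (p.1 + 1))).sum
      = ((PySem.List.pyRange 0 (PySem.List.len l) 1).map
          (fun i => PySem.List.pyGetD l i 0 * (i + 1))).sum := by
    rw [henum, List.map_map]
    rfl
  have hfw := pvFw_enum l 0
  rw [hmaps] at hfw
  rw [hfw]
  norm_num

-- sorting s ++ [v] (s already sorted) = inserting v at position bisect_left s v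
lemma pvSortedInsert (s : List Int) (v : Int) (hs : s.Pairwise (· ≤ ·)) :
    PySem.List.sorted (s ++ [v]) (fun x => x) false
      = s.take (PySem.List.bisectLeft s v) ++ v :: s.drop (PySem.List.bisectLeft s v) := by
  obtain ⟨hk, hlt, hge⟩ := PySem.List.bisectLeft_spec s v hs
  set k := PySem.List.bisectLeft s v with hkdef
  apply PySem.List.sorted_id_eq_of_perm_of_pairwise
  · exact List.Perm.trans List.perm_middle
      (by rw [List.take_append_drop]; exact (List.perm_append_singleton v s).symm)
  · rw [List.pairwise_append]
    refine ⟨hs.sublist (List.take_sublist _ _), ?_, ?_⟩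
    · rw [List.pairwise_cons]
      refine ⟨?_, hs.sublist (List.drop_sublist _ _)⟩
      intro y hy
      obtain ⟨j, hj, hyv⟩ := List.mem_drop_iff_getElem.mp hy
      exact hyv ▸ hge (k + j) (by omega) (by omega)
    · intro x hx y hy
      obtain ⟨i, hi, hxv⟩ := List.mem_take_iff_getElem.mp hx
      have hik : i < k := lt_of_lt_of_le hi (min_le_left _ _)
      have hilen : i < s.length := lt_of_lt_of_le hi (min_le_right _ _)
      have hxlt : x < v := hxv ▸ hlt i hilen hik
      rcases List.mem_cons.mp hy with rfl | hy'
      · exact le_of_lt hxlt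
      · obtain ⟨j, hj, hyv⟩ := List.mem_drop_iff_getElem.mp hy'
        exact le_trans (le_of_lt hxlt) (hyv ▸ hge (k + j) (by omega) (by omega))

lemma pvFw_ins (s : List Int) (v : Int) (k : Nat) (hk : k ≤ s.length) :
    pvFw 1 (s.take k ++ v :: s.drop k)
      = pvFw 1 s + v * ((k : Int) + 1) + (s.drop k).sum := by
  have hlen : (s.take k).length = k := by simp [hk]
  have h1 := pvFw_append (s.take k) (v :: s.drop k) 1
  have h2 := pvFw_append (s.take k) (s.drop k) 1
  rw [List.take_append_drop] at h2
  have h3 := pvFw_shift (s.drop k) (1 + (k : Int))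
  simp only [hlen] at h1 h2
  rw [h1]
  simp only [pvFw]
  rw [h2]
  have h4 : (1 : Int) + (k : Int) + 1 = (1 + (k : Int)) + 1 := by ring
  rw [h4, h3]
  ring

-- the synchronized loop invariant: same total, same sorted list, f ≡ rank-weighted sum (mod M)
lemma pvLoop : ∀ (p : List Int) (t : Int) (s : List Int) (f : Int),
    s.Pairwise (· ≤ ·) → f = PySem.Int.mod (pvFw 1 s) 1000000007 →
    (p.foldl (fun (st : Int × List Int) val =>
        let prefix1 := st.2 ++ [val]
        let prefix2 := PySem.List.sorted prefix1 (fun x => x) false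
        let total := (PySem.List.pyRange 0 (PySem.List.len prefix2) 1).foldl
            (fun t i => PySem.Int.mod (t + PySem.List.pyGetD prefix2 i 0 * (i + 1)) 1000000007) st.1
        (total, prefix2)) (t, s)).1
    = (p.foldl (fun (st : Int × List Int × Int) val =>
        let k := PySem.List.bisectLeft st.2.1 val
        let f := PySem.Int.mod (st.2.2 + val * ((k : Int) + 1) + (st.2.1.drop k).sum) 1000000007
        let s := PySem.List.insert st.2.1 (k : Int) val
        let total := PySem.Int.mod (st.1 + f) 1000000007
        (total, s, f)) (t, s, f)).1 := by
  intro p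
  induction p with
  | nil => intro t s f _ _; rfl
  | cons v p ih =>
      intro t s f hs hf
      obtain ⟨hk, hlt, hge⟩ := PySem.List.bisectLeft_spec s v hs
      set k := PySem.List.bisectLeft s v with hkdef
      have hins : PySem.List.insert s (k : Int) v = s.take k ++ v :: s.drop k :=
        PySem.List.insert_natCast s k v hk
      have hsorted := pvSortedInsert s v hs
      rw [← hkdef] at hsorted
      set P' : List Int := s.take k ++ v :: s.drop k with hP'def
      set fB : Int := PySem.Int.mod (f + v * ((k : Int) + 1) + (s.drop k).sum) 1000000007
        with hfBdef
      have hPpair : P'.Pairwise (· ≤ ·) := by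
        have hsp := PySem.List.sorted_pairwise (s ++ [v]) (fun x => x)
        rw [hsorted] at hsp
        exact hsp
      have hfB : fB = PySem.Int.mod (pvFw 1 P') 1000000007 := by
        rw [hfBdef, hP'def, pvFw_ins s v k hk, hf, pvModM_eq, pvModM_eq, pvModM_eq]
        omega
      have hT : (PySem.List.pyRange 0 (PySem.List.len P') 1).foldl
            (fun t i => PySem.Int.mod (t + PySem.List.pyGetD P' i 0 * (i + 1)) 1000000007) t
          = PySem.Int.mod (t + fB) 1000000007 := by
        rw [pvInner P' t (by simp [hP'def]), hfB, pvModM_eq, pvModM_eq, pvModM_eq]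
        omega
      simp only [List.foldl_cons]
      rw [hsorted, hins, hT]
      exact ih _ P' fB hPpair hfB

-- ===== VERDICT (by name: the statement is the Claim_ definition above) =====
theorem sortedSum_spec : Claim_equal_sortedSum := by
  intro a _
  unfold Spec_sortedSum sortedSum sortedSum_alt
  exact pvLoop a 0 [] 0 List.Pairwise.nil rfl
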